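-- pv_equiv track=rewrite | github.com/Beschuetzer/autobid | helpers.py | getIndexOfNthBid
-- ===== SOURCE A (Python) =====
-- def getIndexOfNthBid(username, biddingAbsolute, nthBid):
--     '''
--     inputs: ------------------------------
--         username - string
--         biddingAbsolute - 2D array
--         nthBid - an integer greater than or equal to 1 (1 = first bid) or less than or equal to -1 (-1 = last bid, -2 = 2nd to last bid...)
--     returns ------------------------------ the index in biddingAbsolute of the nthBid that username made
--     '''
--     i = 0
--     matchCount = 0
--
--
--     if nthBid < 0:
--         nthBidCounter = 0
--         for i in range(-1, -(len(biddingAbsolute) + 1), -1):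
--             adjustedI = len(biddingAbsolute) + i
--             bid = biddingAbsolute[adjustedI]
--             if bid[0] == username:
--                 nthBidCounter += 1
--                 if nthBidCounter == -nthBid:
--                     return adjustedI
--
--         if len(biddingAbsolute) == 0: return 0
--         else: return len(biddingAbsolute) - 1
--     else:
--         for bid in biddingAbsolute:
--             if bid[0] == username:
--                 matchCount += 1
--                 if matchCount == nthBid:
--                     return i
--             i += 1
--
--     return None
-- ===== SOURCE B (Python) =====
-- def getIndexOfNthBid(username, biddingAbsolute, nthBid):
--     # Table of match indices in one pass (an empty row can never match), then one arithmetic selection.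
--     matches = [i for i, bid in enumerate(biddingAbsolute) if bid and bid[0] == username]
--     if nthBid < 0:
--         if -nthBid <= len(matches):
--             return matches[nthBid]
--         return 0 if not biddingAbsolute else len(biddingAbsolute) - 1
--     if 1 <= nthBid <= len(matches):
--         return matches[nthBid - 1]
--     return None
-- ===== Notes on version B (the rewrite author's own statement) =====
-- stated objective: simpler
-- what changed: Replaces A's two asymmetric counting loops (a backward index-arithmetic scan for negative nthBid and a forward counter loop for positive) by a single enumerate pass that builds the table of match indices, followed by one arithmetic selection with Python negative indexing.
import Mathlib
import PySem

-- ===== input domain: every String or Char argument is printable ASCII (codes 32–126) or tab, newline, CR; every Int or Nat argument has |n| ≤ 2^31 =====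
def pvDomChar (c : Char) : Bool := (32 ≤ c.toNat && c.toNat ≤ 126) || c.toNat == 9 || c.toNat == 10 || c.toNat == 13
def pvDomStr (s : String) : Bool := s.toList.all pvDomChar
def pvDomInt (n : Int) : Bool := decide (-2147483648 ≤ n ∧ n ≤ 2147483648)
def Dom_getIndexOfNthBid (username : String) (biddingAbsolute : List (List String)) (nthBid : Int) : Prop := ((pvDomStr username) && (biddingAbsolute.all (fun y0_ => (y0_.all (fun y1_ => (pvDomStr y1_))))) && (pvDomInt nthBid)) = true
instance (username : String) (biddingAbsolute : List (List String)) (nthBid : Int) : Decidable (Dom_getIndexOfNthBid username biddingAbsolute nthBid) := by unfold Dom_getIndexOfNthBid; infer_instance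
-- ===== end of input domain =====

-- B replaces A's two counting loops by one table-building pass plus a single selection (objective: simpler).

-- ===== PORT A =====
-- forward loop of A's nonnegative branch: 'for bid in biddingAbsolute: …' with running index i and matchCount
def pvA_posLoop (username : String) (nthBid : Int) : List (List String) → Int → Int → Option Int
  | [], _, _ => none
  | bid :: rest, i, matchCount =>
    match PySem.List.pyGet? bid 0 with
    | none => none   -- bid[0] IndexError on an empty row; excluded by Pre_
    | some h =>
      if h = username then
        if matchCount + 1 = nthBid then some i
        else pvA_posLoop username nthBid rest (i + 1) (matchCount + 1)
      else pvA_posLoop username nthBid rest (i + 1) matchCount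

-- backward loop of A's negative branch over 'range(-1, -(len+1), -1)' with nthBidCounter
def pvA_negLoop (username : String) (ba : List (List String)) (nthBid : Int) : List Int → Int → Option Int
  | [], _ => if ba.length = 0 then some 0 else some ((ba.length : Int) - 1)
  | i :: rest, counter =>
    let adjustedI : Int := (ba.length : Int) + i
    match PySem.List.pyGet? ba adjustedI with
    | none => none
    | some bid =>
      match PySem.List.pyGet? bid 0 with
      | none => none   -- bid[0] IndexError on an empty row; excluded by Pre_
      | some h =>
        if h = username then
          if counter + 1 = -nthBid then some adjustedI
          else pvA_negLoop username ba nthBid rest (counter + 1)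
        else pvA_negLoop username ba nthBid rest counter

def getIndexOfNthBid (username : String) (biddingAbsolute : List (List String)) (nthBid : Int) : Option Int :=
  if nthBid < 0 then
    pvA_negLoop username biddingAbsolute nthBid
      (PySem.List.pyRange (-1) (-((biddingAbsolute.length : Int) + 1)) (-1)) 0
  else
    pvA_posLoop username nthBid biddingAbsolute 0 0

-- ===== PORT B =====
-- B: one enumerate pass building the table of indices i with 'bid and bid[0] == username'
-- (a nonempty row whose head is the username), then a single arithmetic selection from the table.
def getIndexOfNthBid_alt (username : String) (biddingAbsolute : List (List String)) (nthBid : Int) : Option Int :=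
  let ms : List Int :=
    (PySem.List.enumerate biddingAbsolute 0).filterMap
      (fun p => if p.2.head? = some username then some p.1 else none)
  if nthBid < 0 then
    if -nthBid ≤ (ms.length : Int) then PySem.List.pyGet? ms nthBid
    else if biddingAbsolute = [] then some 0 else some ((biddingAbsolute.length : Int) - 1)
  else
    if 1 ≤ nthBid ∧ nthBid ≤ (ms.length : Int) then PySem.List.pyGet? ms (nthBid - 1)
    else none

-- ===== PRECONDITION & SPEC =====
-- number of rows whose first element is username (an empty row never counts)
def pvCnt (u : String) : List (List String) → Nat
  | [] => 0
  | b :: r => (if b.head? = some u then 1 else 0) + pvCnt u r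

-- Pre_ excludes EXACTLY the inputs on which Python A raises IndexError: those where A's scan
-- reaches an empty row (bid[0]) before returning — i.e. some empty row at position j has fewer
-- than the required number of username-matches strictly before it (forward scan, nthBid ≥ 1;
-- nthBid = 0 never returns early, so any empty row raises) or strictly after it (backward scan,
-- nthBid < 0).  On every input A returns on, Pre_ holds and B matches A.
def Pre_getIndexOfNthBid (username : String) (biddingAbsolute : List (List String)) (nthBid : Int) : Prop :=
  (nthBid < 0 → ∀ j : Nat, j < biddingAbsolute.length → biddingAbsolute[j]? = some [] →
      -nthBid ≤ (pvCnt username (biddingAbsolute.drop (j + 1)) : Int)) ∧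
  (0 ≤ nthBid → ∀ j : Nat, j < biddingAbsolute.length → biddingAbsolute[j]? = some [] →
      1 ≤ nthBid ∧ nthBid ≤ (pvCnt username (biddingAbsolute.take j) : Int))
instance (username : String) (biddingAbsolute : List (List String)) (nthBid : Int) : Decidable (Pre_getIndexOfNthBid username biddingAbsolute nthBid) := by unfold Pre_getIndexOfNthBid; infer_instance
def pvWitness_getIndexOfNthBid : String × List (List String) × Int := ("u", [["u"], ["v"], ["u"]], -2)

def Spec_getIndexOfNthBid (username : String) (biddingAbsolute : List (List String)) (nthBid : Int) (out : Option Int) : Prop := out = getIndexOfNthBid_alt username biddingAbsolute nthBid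
instance (username : String) (biddingAbsolute : List (List String)) (nthBid : Int) (out : Option Int) : Decidable (Spec_getIndexOfNthBid username biddingAbsolute nthBid out) := by unfold Spec_getIndexOfNthBid; infer_instance

-- ===== CLAIM (what is proved, stated in full; the proofs are below) =====
def Claim_equal_getIndexOfNthBid : Prop := ∀ (username : String) (biddingAbsolute : List (List String)) (nthBid : Int), Dom_getIndexOfNthBid username biddingAbsolute nthBid → Pre_getIndexOfNthBid username biddingAbsolute nthBid → Spec_getIndexOfNthBid username biddingAbsolute nthBid (getIndexOfNthBid username biddingAbsolute nthBid)

-- ===== LEMMAS AND PROOFS =====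

-- the match-index table (what B's comprehension builds), recursively with a running start index
def pvMIdx (u : String) : List (List String) → Int → List Int
  | [], _ => []
  | bid :: rest, s => (if bid.head? = some u then [s] else []) ++ pvMIdx u rest (s + 1)

theorem pvCnt_append (u : String) (xs ys : List (List String)) :
    pvCnt u (xs ++ ys) = pvCnt u xs + pvCnt u ys := by
  induction xs with
  | nil => simp [pvCnt]
  | cons x xs ih => simp [pvCnt, ih]; ring

theorem pvGet_cons (x : Int) (xs : List Int) (j : Int) (hj : 1 ≤ j) :
    PySem.List.pyGet? (x :: xs) j = PySem.List.pyGet? xs (j - 1) := by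
  rw [PySem.List.pyGet?_of_nonneg _ (show (0:Int) ≤ j by omega),
      PySem.List.pyGet?_of_nonneg _ (show (0:Int) ≤ j - 1 by omega)]
  have : j.toNat = (j - 1).toNat + 1 := by omega
  rw [this]
  simp

theorem pvGet_snoc (xs : List Int) (y : Int) (j : Int) (hj : j ≤ -2) (hj2 : -j ≤ (xs.length : Int) + 1) :
    PySem.List.pyGet? (xs ++ [y]) j = PySem.List.pyGet? xs (j + 1) := by
  obtain ⟨k, rfl⟩ : ∃ k : Nat, j = -(k:Int) := ⟨(-j).toNat, by omega⟩
  have h2 : -(k:Int) + 1 = -(((k - 1 : Nat)):Int) := by omega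
  rw [h2, PySem.List.pyGet?_neg_natCast _ _ (by omega) (by simp at hj2 ⊢; omega),
      PySem.List.pyGet?_neg_natCast _ _ (by omega) (by omega)]
  have h3 : (xs ++ [y]).length - k = xs.length - (k - 1) := by simp; omega
  rw [h3, List.getElem?_append_left (by omega)]

theorem pvMIdx_append (u : String) (xs ys : List (List String)) (s : Int) :
    pvMIdx u (xs ++ ys) s = pvMIdx u xs s ++ pvMIdx u ys (s + xs.length) := by
  induction xs generalizing s with
  | nil => simp [pvMIdx]
  | cons x xs ih => simp [pvMIdx, ih (s + 1)]; ring_nf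

theorem pvMatches_eq (u : String) (ba : List (List String)) (s : Int) :
    (PySem.List.enumerate ba s).filterMap
      (fun p => if p.2.head? = some u then some p.1 else none) = pvMIdx u ba s := by
  induction ba generalizing s with
  | nil => simp [pvMIdx, PySem.List.enumerate_nil]
  | cons x xs ih =>
    rw [PySem.List.enumerate_cons]
    by_cases h : x.head? = some u <;> simp [pvMIdx, h, ih]

theorem pvPos_eq (u : String) (nth : Int) (rest : List (List String)) : ∀ (i c : Int),
    (∀ j : Nat, rest[j]? = some [] →
        c < nth ∧ nth - c ≤ (pvCnt u (rest.take j) : Int)) →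
    pvA_posLoop u nth rest i c =
      (if 1 ≤ nth - c ∧ nth - c ≤ ((pvMIdx u rest i).length : Int)
       then PySem.List.pyGet? (pvMIdx u rest i) (nth - c - 1) else none) := by
  induction rest with
  | nil =>
    intro i c _
    simp only [pvA_posLoop, pvMIdx, List.length_nil]
    rw [if_neg (by omega)]
  | cons bid rest ih =>
    intro i c H
    obtain ⟨h, t, rfl⟩ : ∃ h t, bid = h :: t := by
      cases bid with
      | nil =>
        exfalso
        have h0 := H 0 (by simp)
        simp [pvCnt] at h0
        omega
      | cons h t => exact ⟨h, t, rfl⟩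
    have Htail : ∀ (c' : Int),
        (¬ (h :: t).head? = some u ∧ c' = c) ∨
          ((h :: t).head? = some u ∧ c' = c + 1 ∧ c' < nth) →
        (∀ j : Nat, rest[j]? = some [] → c' < nth ∧ nth - c' ≤ (pvCnt u (rest.take j) : Int)) := by
      rintro c' hc' j hj
      have hJ := H (j + 1) (by simpa using hj)
      rw [List.take_succ_cons] at hJ
      simp only [pvCnt] at hJ
      rcases hc' with ⟨hm, rfl⟩ | ⟨hm, rfl, hlt⟩
      · rw [if_neg hm] at hJ
        refine ⟨hJ.1, ?_⟩
        have h2 := hJ.2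
        push_cast at h2 ⊢; omega
      · refine ⟨hlt, ?_⟩
        have h2 := hJ.2
        rw [if_pos hm] at h2
        push_cast at h2 ⊢; omega
    simp only [pvA_posLoop, PySem.List.pyGet?_zero_cons]
    by_cases hu : h = u
    · subst hu
      have e : pvMIdx h ((h :: t) :: rest) i = i :: pvMIdx h rest (i + 1) := by
        simp [pvMIdx]
      rw [if_pos rfl, e]
      by_cases hc : c + 1 = nth
      · rw [if_pos hc, if_pos ⟨by omega, by push_cast [List.length_cons]; omega⟩]
        rw [show nth - c - 1 = 0 from by omega, PySem.List.pyGet?_zero_cons]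
      · rw [if_neg hc]
        have hrec : pvA_posLoop h nth rest (i + 1) (c + 1) =
            (if 1 ≤ nth - (c + 1) ∧ nth - (c + 1) ≤ ((pvMIdx h rest (i + 1)).length : Int)
             then PySem.List.pyGet? (pvMIdx h rest (i + 1)) (nth - (c + 1) - 1) else none) := by
          by_cases hnil : ∃ j : Nat, rest[j]? = some []
          · obtain ⟨j0, hj0⟩ := hnil
            have hlt : c + 1 < nth := by
              have := (H (j0 + 1) (by simpa using hj0)).1
              omega
            exact ih (i + 1) (c + 1) (Htail (c + 1) (Or.inr ⟨by simp, rfl, hlt⟩))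
          · push Not at hnil
            exact ih (i + 1) (c + 1) (fun j hj => absurd hj (by simp [hnil j]))
        rw [hrec]
        by_cases hin : 1 ≤ nth - (c + 1) ∧ nth - (c + 1) ≤ ((pvMIdx h rest (i + 1)).length : Int)
        · rw [if_pos hin, if_pos (by push_cast [List.length_cons]; omega)]
          rw [pvGet_cons _ _ _ (by omega)]
          congr 1
          omega
        · rw [if_neg hin, if_neg (by push_cast [List.length_cons] at hin ⊢; omega)]
    · have e : pvMIdx u ((h :: t) :: rest) i = pvMIdx u rest (i + 1) := by
        simp [pvMIdx, hu]
      rw [if_neg hu, e, ih (i + 1) c (Htail c (Or.inl ⟨by simp [hu], rfl⟩))]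

theorem pvNeg_eq (u : String) (ba : List (List String)) (nth : Int) :
    ∀ (k : Nat), k ≤ ba.length → ∀ (c : Int), c < -nth →
    (∀ j : Nat, j < k → ba[j]? = some [] →
        -nth - c ≤ (pvCnt u ((ba.take k).drop (j + 1)) : Int)) →
    pvA_negLoop u ba nth
        (PySem.List.pyRange (-(((ba.length : Int) - k)) - 1) (-((ba.length : Int) + 1)) (-1)) c =
      (if 1 ≤ -nth - c ∧ -nth - c ≤ ((pvMIdx u (ba.take k) 0).length : Int)
       then PySem.List.pyGet? (pvMIdx u (ba.take k) 0) (nth + c)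
       else if ba.length = 0 then some 0 else some ((ba.length : Int) - 1)) := by
  intro k
  induction k with
  | zero =>
    intro _ c hc _
    rw [PySem.List.pyRange_neg_one_eq_nil (by push_cast; omega)]
    simp only [pvA_negLoop, List.take_zero, pvMIdx, List.length_nil]
    split_ifs <;> first | rfl | (exfalso; omega)
  | succ k ih =>
    intro hk c hc H
    have hk' : k < ba.length := by omega
    rw [PySem.List.pyRange_neg_one_cons (by push_cast; omega)]
    simp only [pvA_negLoop]
    rw [show (ba.length : Int) + (-(((ba.length : Int) - ((k + 1 : Nat) : Int))) - 1) = ((k : Nat) : Int) from by push_cast; omega]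
    rw [show (-(((ba.length : Int) - ((k + 1 : Nat) : Int))) - 1) - 1 = -(((ba.length : Int) - (k : Nat))) - 1 from by push_cast; omega]
    rw [PySem.List.pyGet?_natCast, List.getElem?_eq_getElem hk']
    have hlen : (ba.take k).length = k := by simp; omega
    obtain ⟨h, t, hrow⟩ : ∃ h t, ba[k] = h :: t := by
      cases hbk : ba[k] with
      | nil =>
        exfalso
        have hH := H k (by omega) (by rw [List.getElem?_eq_getElem hk', hbk])
        rw [List.drop_eq_nil_of_le (by simp)] at hH
        simp only [pvCnt, Nat.cast_zero] at hH
        omega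
      | cons h t => exact ⟨h, t, rfl⟩
    rw [hrow]
    simp only [PySem.List.pyGet?_zero_cons]
    have ht : ba.take (k + 1) = ba.take k ++ [h :: t] := by
      rw [List.take_add_one, List.getElem?_eq_getElem hk', hrow]
      rfl
    have Htail : ∀ (c' : Int),
        (¬ (h :: t).head? = some u ∧ c' = c) ∨
          ((h :: t).head? = some u ∧ c' = c + 1) →
        (∀ j : Nat, j < k → ba[j]? = some [] →
          -nth - c' ≤ (pvCnt u ((ba.take k).drop (j + 1)) : Int)) := by
      rintro c' hc' j hj hje
      have hJ := H j (by omega) hje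
      rw [ht, List.drop_append_of_le_length (by omega), pvCnt_append] at hJ
      simp only [pvCnt] at hJ
      rcases hc' with ⟨hm, rfl⟩ | ⟨hm, rfl⟩
      · rw [if_neg hm] at hJ
        push_cast at hJ ⊢; omega
      · rw [if_pos hm] at hJ
        push_cast at hJ ⊢; omega
    by_cases hu : h = u
    · subst hu
      have e : pvMIdx h (ba.take (k + 1)) 0 = pvMIdx h (ba.take k) 0 ++ [((k : Nat) : Int)] := by
        rw [ht, pvMIdx_append, hlen]
        simp [pvMIdx]
      rw [if_pos rfl, e]
      by_cases hcq : c + 1 = -nth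
      · rw [if_pos hcq, if_pos ⟨by omega, by simp only [List.length_append, List.length_cons, List.length_nil]; push_cast; omega⟩]
        rw [show nth + c = -1 from by omega, PySem.List.pyGet?_neg_one_append_singleton]
      · rw [if_neg hcq, ih (by omega) (c + 1) (by omega) (Htail (c + 1) (Or.inr ⟨by simp, rfl⟩))]
        by_cases hin : 1 ≤ -nth - (c + 1) ∧ -nth - (c + 1) ≤ ((pvMIdx h (ba.take k) 0).length : Int)
        · rw [if_pos hin, if_pos (by simp only [List.length_append, List.length_cons, List.length_nil]; push_cast; omega)]
          rw [pvGet_snoc _ _ _ (by omega) (by omega)]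
          congr 1
          omega
        · rw [if_neg hin, if_neg (show ¬(1 ≤ -nth - c ∧ -nth - c ≤ (((pvMIdx h (ba.take k) 0 ++ [((k : Nat) : Int)]).length : Nat) : Int)) from by simp only [List.length_append, List.length_cons, List.length_nil]; push_cast; omega)]
    · have e : pvMIdx u (ba.take (k + 1)) 0 = pvMIdx u (ba.take k) 0 := by
        rw [ht, pvMIdx_append, hlen]
        simp [pvMIdx, hu]
      rw [if_neg hu, e, ih (by omega) c hc (Htail c (Or.inl ⟨by simp [hu], rfl⟩))]

-- ===== VERDICT (by name: the statement is the Claim_ definition above) =====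
theorem getIndexOfNthBid_spec : Claim_equal_getIndexOfNthBid := by
  intro u ba nth _ hpre
  unfold Spec_getIndexOfNthBid getIndexOfNthBid getIndexOfNthBid_alt
  simp only []
  rw [pvMatches_eq]
  by_cases hneg : nth < 0
  · rw [if_pos hneg, if_pos hneg]
    have H : ∀ j : Nat, j < ba.length → ba[j]? = some [] →
        -nth - 0 ≤ (pvCnt u ((ba.take ba.length).drop (j + 1)) : Int) := by
      intro j hj hje
      rw [List.take_length]
      have := hpre.1 hneg j hj hje
      omega
    have h := pvNeg_eq u ba nth ba.length le_rfl 0 (by omega) H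
    rw [show -(((ba.length : Int) - (ba.length : Nat))) - 1 = (-1 : Int) from by omega,
        List.take_length, add_zero] at h
    rw [h]
    by_cases hle : -nth ≤ ((pvMIdx u ba 0).length : Int)
    · rw [if_pos (show (1:Int) ≤ -nth - 0 ∧ -nth - 0 ≤ ((pvMIdx u ba 0).length : Int) from ⟨by omega, by omega⟩), if_pos hle]
    · rw [if_neg (show ¬((1:Int) ≤ -nth - 0 ∧ -nth - 0 ≤ ((pvMIdx u ba 0).length : Int)) from by omega), if_neg hle]
      by_cases hnil : ba = []
      · rw [if_pos (by simp [hnil]), if_pos hnil]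
      · rw [if_neg (by simp [hnil]), if_neg hnil]
  · rw [if_neg hneg, if_neg hneg]
    have H : ∀ j : Nat, ba[j]? = some [] →
        (0:Int) < nth ∧ nth - 0 ≤ (pvCnt u (ba.take j) : Int) := by
      intro j hj
      obtain ⟨hlt, -⟩ := List.getElem?_eq_some_iff.mp hj
      have := hpre.2 (by omega) j hlt hj
      exact ⟨by omega, by omega⟩
    have h := pvPos_eq u nth ba 0 0 H
    simp only [sub_zero] at h
    rw [h]
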